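-- pv_equiv track=rewrite | github.com/porfanid/BigData | Ilias/PartA.py | deterministic_heavy_hitters
-- ===== SOURCE A (Python) =====
-- def deterministic_heavy_hitters(stream, k):
--     # Klassikos nueteterministikos algorithmos gia f-heavy hitters
--     L = {}
--     for item in stream:
--         if item in L:
--             L[item] += 1
--         elif len(L) < k:
--             L[item] = 1
--         else:
--             to_remove = []
--             for key in L:
--                 L[key] -= 1
--                 if L[key] == 0:
--                     to_remove.append(key)
--             for key in to_remove:
--                 del L[key]
--     return L
-- ===== SOURCE B (Python) =====
-- def deterministic_heavy_hitters(stream, k):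
--     # Misra-Gries with a global decrement offset: counters are stored as
--     # (true count + off); a full "decrement everything" step becomes a single
--     # off += 1, and the survivors pass is skipped entirely (O(1)) whenever the
--     # tracked lower bound minv on stored counters shows nothing can reach zero.
--     c = {}
--     off = 0
--     minv = 0  # lower bound on every value stored in c
--     for item in stream:
--         if item in c:
--             c[item] += 1
--         elif len(c) < k:
--             c[item] = off + 1
--             minv = off + 1
--         else:
--             off += 1
--             if minv <= off:
--                 c = {key: v for key, v in c.items() if v > off}
--                 minv = min(c.values(), default=off)
--     return {key: v - off for key, v in c.items()}
-- ===== Notes on version B (the rewrite author's own statement) =====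
-- stated objective: alternative
-- what changed: B replaces A's per-item full-dictionary decrement sweep by a single global offset increment plus a tracked lower bound on the stored counters, so a sweep over the survivors happens only when some counter can actually reach zero; counters are stored shifted by the offset and unshifted once at the end.
import Mathlib
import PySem

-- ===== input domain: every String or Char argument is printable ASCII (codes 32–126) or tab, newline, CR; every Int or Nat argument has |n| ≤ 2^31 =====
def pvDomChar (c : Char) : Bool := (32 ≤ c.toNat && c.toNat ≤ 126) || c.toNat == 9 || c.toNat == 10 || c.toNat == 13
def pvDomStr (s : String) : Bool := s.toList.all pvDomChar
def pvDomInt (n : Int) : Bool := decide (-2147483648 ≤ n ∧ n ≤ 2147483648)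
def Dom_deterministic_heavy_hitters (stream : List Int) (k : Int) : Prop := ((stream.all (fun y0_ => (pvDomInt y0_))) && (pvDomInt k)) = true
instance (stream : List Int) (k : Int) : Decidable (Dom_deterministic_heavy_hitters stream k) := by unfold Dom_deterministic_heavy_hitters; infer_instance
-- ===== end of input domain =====

-- B (alt) replaces A's per-item decrement sweep over the whole dictionary by one global
-- offset increment plus a tracked lower bound on the stored counters, sweeping only when
-- some counter can actually reach zero; counters are stored shifted by the offset and
-- unshifted once at the end (objective: alternative algorithm, same results).

-- ===== PORT A =====
-- inner loop body of A's 'for key in L: L[key] -= 1; if L[key] == 0: to_remove.append(key)'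
def pvDecStep (st : PySem.Dict Int Int × List Int) (key : Int) : PySem.Dict Int Int × List Int :=
  let L2 := st.1.modify key 0 (fun v => v - 1)
  if L2.getD key 0 == 0 then (L2, st.2 ++ [key]) else (L2, st.2)

def pvStepA (k : Int) (L : PySem.Dict Int Int) (item : Int) : PySem.Dict Int Int :=
  if L.contains item then
    L.modify item 0 (fun v => v + 1)
  else if (L.size : Int) < k then
    L.insert item 1
  else
    let p := L.keys.foldl pvDecStep (L, [])
    p.2.foldl (fun d key => d.erase key) p.1

def deterministic_heavy_hitters (stream : List Int) (k : Int) : List (Int × Int) :=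
  (stream.foldl (pvStepA k) PySem.Dict.empty).items

-- ===== PORT B =====
def pvStepB (k : Int) (st : PySem.Dict Int Int × Int × Int) (item : Int) :
    PySem.Dict Int Int × Int × Int :=
  let c := st.1
  let off := st.2.1
  let minv := st.2.2
  if c.contains item then (c.modify item 0 (fun v => v + 1), off, minv)
  else if (c.size : Int) < k then (c.insert item (off + 1), off, off + 1)
  else
    let off' := off + 1
    if minv ≤ off' then
      let c' : PySem.Dict Int Int := PySem.Dict.mk (c.items.filter (fun p => off' < p.2))
      (c', off', PySem.List.minD c'.values (fun v => v) off')
    else (c, off', minv)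

def deterministic_heavy_hitters_alt (stream : List Int) (k : Int) : List (Int × Int) :=
  let s := stream.foldl (pvStepB k) (PySem.Dict.empty, 0, 0)
  s.1.items.map (fun p => (p.1, p.2 - s.2.1))

-- ===== PRECONDITION & SPEC =====
def Spec_deterministic_heavy_hitters (stream : List Int) (k : Int) (out : List (Int × Int)) : Prop := out = deterministic_heavy_hitters_alt stream k
instance (stream : List Int) (k : Int) (out : List (Int × Int)) : Decidable (Spec_deterministic_heavy_hitters stream k out) := by unfold Spec_deterministic_heavy_hitters; infer_instance

-- ===== CLAIM (what is proved, stated in full; the proofs are below) =====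
def Claim_equal_deterministic_heavy_hitters : Prop := ∀ (stream : List Int) (k : Int), Dom_deterministic_heavy_hitters stream k → Spec_deterministic_heavy_hitters stream k (deterministic_heavy_hitters stream k)

-- ===== LEMMAS AND PROOFS =====

-- The simulation invariant: A's dictionary is B's with every value un-shifted by `off`;
-- every stored B-value exceeds `off` and is at least `minv`; keys are distinct.
def pvRel (L c : PySem.Dict Int Int) (off minv : Int) : Prop :=
  L.items = c.items.map (fun p => (p.1, p.2 - off)) ∧
  (∀ p ∈ c.items, off < p.2 ∧ minv ≤ p.2) ∧
  (c.items.map Prod.fst).Nodup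

lemma pvMapFstMap (l : List (Int × Int)) (g : Int × Int → Int × Int)
    (hg : ∀ p, (g p).1 = p.1) : (l.map g).map Prod.fst = l.map Prod.fst := by
  rw [List.map_map]; exact List.map_congr_left (fun p _ => hg p)

lemma pvFindMap (l : List (Int × Int)) (g : Int × Int → Int × Int)
    (hg : ∀ p, (g p).1 = p.1) (x : Int) :
    (l.map g).find? (fun p => p.1 == x) = (l.find? (fun p => p.1 == x)).map g := by
  induction l with
  | nil => rfl
  | cons a t ih =>
    by_cases h : a.1 = x
    · rw [List.map_cons, List.find?_cons_of_pos (by simp [hg, h]),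
        List.find?_cons_of_pos (by simp [h])]
      rfl
    · rw [List.map_cons, List.find?_cons_of_neg (by simp [hg, h]),
        List.find?_cons_of_neg (by simp [h]), ih]

lemma pvFstRepl (l : List (Int × Int)) (x w : Int) :
    (l.map (fun p => if p.1 == x then (x, w) else p)).map Prod.fst = l.map Prod.fst := by
  rw [List.map_map]
  refine List.map_congr_left (fun p _ => ?_)
  by_cases h : p.1 = x <;> simp [Function.comp, h]

lemma pvFindMid (pre t : List (Int × Int)) (a : Int × Int)
    (hpre : ∀ p ∈ pre, (p.1 == a.1) = false) :
    (pre ++ a :: t).find? (fun p => p.1 == a.1) = some a := by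
  induction pre with
  | nil => rw [List.nil_append, List.find?_cons_of_pos (by simp)]
  | cons b pr ih =>
    rw [List.cons_append, List.find?_cons_of_neg (by simp [hpre b (by simp)])]
    exact ih (fun p hp => hpre p (List.mem_cons_of_mem _ hp))

lemma pvReplMid (pre t : List (Int × Int)) (a : Int × Int) (w : Int)
    (hpre : ∀ p ∈ pre, (p.1 == a.1) = false)
    (ht : ∀ p ∈ t, (p.1 == a.1) = false) :
    (pre ++ a :: t).map (fun p => if p.1 == a.1 then (a.1, w) else p)
      = pre ++ (a.1, w) :: t := by
  rw [List.map_append, List.map_cons]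
  have h1 : pre.map (fun p => if p.1 == a.1 then (a.1, w) else p) = pre := by
    conv_rhs => rw [← List.map_id pre]
    exact List.map_congr_left (fun p hp => by simp [hpre p hp])
  have h2 : t.map (fun p => if p.1 == a.1 then (a.1, w) else p) = t := by
    conv_rhs => rw [← List.map_id t]
    exact List.map_congr_left (fun p hp => by simp [ht p hp])
  rw [h1, h2]
  simp

lemma pvDecFold (l : List (Int × Int)) : ∀ (pre : List (Int × Int)) (acc : List Int),
    ((pre ++ l).map Prod.fst).Nodup →
    (l.map Prod.fst).foldl pvDecStep (PySem.Dict.mk (pre ++ l), acc)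
      = (PySem.Dict.mk (pre ++ l.map (fun q => (q.1, q.2 - 1))),
         acc ++ (l.filter (fun q => q.2 == 1)).map Prod.fst) := by
  induction l with
  | nil => intro pre acc _; simp
  | cons a t ih =>
    intro pre acc hn
    have hn' := hn
    rw [List.map_append, List.map_cons] at hn'
    have hd := (List.nodup_append.mp hn').2.2
    have hat := (List.nodup_cons.mp (List.Nodup.of_append_right hn')).1
    have hpre : ∀ p ∈ pre, (p.1 == a.1) = false := by
      intro p hp
      rw [beq_eq_false_iff_ne]
      exact fun heq => (hd p.1 (List.mem_map.mpr ⟨p, hp, rfl⟩) a.1 (by simp)) heq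
    have ht : ∀ p ∈ t, (p.1 == a.1) = false := by
      intro p hp
      rw [beq_eq_false_iff_ne]
      exact fun heq => hat (List.mem_map.mpr ⟨p, hp, heq⟩)
    have hcont : (PySem.Dict.mk (pre ++ a :: t)).contains a.1 = true := by
      simp only [PySem.Dict.contains, List.any_eq_true]
      exact ⟨a, by simp, by simp⟩
    have hget : (PySem.Dict.mk (pre ++ a :: t)).getD a.1 0 = a.2 := by
      simp [PySem.Dict.getD, PySem.Dict.get?, pvFindMid pre t a hpre]
    have hget2 : (PySem.Dict.mk (pre ++ (a.1, a.2 - 1) :: t)).getD a.1 0 = a.2 - 1 := by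
      simp [PySem.Dict.getD, PySem.Dict.get?, pvFindMid pre t (a.1, a.2 - 1) hpre]
    have hstep : pvDecStep (PySem.Dict.mk (pre ++ a :: t), acc) a.1
        = (PySem.Dict.mk (pre ++ (a.1, a.2 - 1) :: t),
           if a.2 = 1 then acc ++ [a.1] else acc) := by
      unfold pvDecStep
      have hmod : (PySem.Dict.mk (pre ++ a :: t)).modify a.1 0 (fun v => v - 1)
          = PySem.Dict.mk (pre ++ (a.1, a.2 - 1) :: t) := by
        simp only [PySem.Dict.modify, PySem.Dict.insert, hcont, hget]
        rw [if_pos trivial]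
        exact congrArg PySem.Dict.mk (pvReplMid pre t a (a.2 - 1) hpre ht)
      rw [hmod]
      by_cases h1 : a.2 = 1
      · rw [if_pos (by rw [hget2]; simp [h1]), if_pos h1]
      · rw [if_neg (by rw [hget2]; simp; omega), if_neg h1]
    rw [List.map_cons, List.foldl_cons, hstep]
    have hn2 : (((pre ++ [(a.1, a.2 - 1)]) ++ t).map Prod.fst).Nodup := by
      rw [List.map_append, List.map_append]
      rw [List.map_append, List.map_cons] at hn
      simpa [List.append_assoc] using hn
    by_cases h1 : a.2 = 1
    · rw [if_pos h1]
      have hme := ih (pre ++ [(a.1, a.2 - 1)]) (acc ++ [a.1]) hn2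
      rw [List.append_assoc, List.singleton_append] at hme
      rw [hme, List.filter_cons_of_pos (by simp [h1])]
      simp [List.append_assoc]
    · rw [if_neg h1]
      have hme := ih (pre ++ [(a.1, a.2 - 1)]) acc hn2
      rw [List.append_assoc, List.singleton_append] at hme
      rw [hme, List.filter_cons_of_neg (by simp [h1])]
      simp [List.append_assoc]

lemma pvEraseFold (ks : List Int) : ∀ (d : PySem.Dict Int Int),
    (ks.foldl (fun d key => d.erase key) d).items
      = d.items.filter (fun q => decide (q.1 ∉ ks)) := by
  induction ks with
  | nil => intro d; simp
  | cons a t ih =>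
    intro d
    rw [List.foldl_cons, ih]
    show (d.items.filter (fun p => !(p.1 == a))).filter (fun q => decide (q.1 ∉ t)) = _
    rw [List.filter_filter]
    refine List.filter_congr (fun q _ => ?_)
    by_cases h1 : q.1 = a <;> by_cases h2 : q.1 ∈ t <;> simp [h1, h2]

lemma pvZeros (l : List (Int × Int)) (hn : (l.map Prod.fst).Nodup)
    (r : Int × Int) (hr : r ∈ l) :
    decide (r.1 ∈ (l.filter (fun q => q.2 == 1)).map Prod.fst) = (r.2 == 1) := by
  by_cases h : r.2 = 1
  · have hm : r.1 ∈ (l.filter (fun q => q.2 == 1)).map Prod.fst :=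
      List.mem_map.mpr ⟨r, List.mem_filter.mpr ⟨hr, by simp [h]⟩, rfl⟩
    simp [h, hm]
  · have hm : r.1 ∉ (l.filter (fun q => q.2 == 1)).map Prod.fst := by
      intro hm
      obtain ⟨s, hs, hse⟩ := List.mem_map.mp hm
      obtain ⟨hsl, hs1⟩ := List.mem_filter.mp hs
      have hsr : s = r := List.inj_on_of_nodup_map hn hsl hr hse
      rw [hsr] at hs1
      simp [h] at hs1
    simp [h, hm]

lemma pvStepA_dec (L : PySem.Dict Int Int) (hn : (L.items.map Prod.fst).Nodup) :
    ((L.keys.foldl pvDecStep (L, ([] : List Int))).2.foldl (fun d key => d.erase key)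
        (L.keys.foldl pvDecStep (L, ([] : List Int))).1).items
      = (L.items.map (fun q => (q.1, q.2 - 1))).filter (fun q => !(q.2 == 0)) := by
  have hfold : (L.items.map Prod.fst).foldl pvDecStep (L, ([] : List Int))
      = (PySem.Dict.mk (L.items.map (fun q => (q.1, q.2 - 1))),
         (L.items.filter (fun q => q.2 == 1)).map Prod.fst) := by
    simpa using pvDecFold L.items [] [] (by simpa using hn)
  have hkeys : L.keys = L.items.map Prod.fst := rfl
  rw [hkeys, hfold, pvEraseFold]
  dsimp only
  refine List.filter_congr (fun q hq => ?_)
  obtain ⟨r, hr, rfl⟩ := List.mem_map.mp hq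
  have hz := pvZeros L.items hn r hr
  by_cases h1 : r.2 = 1
  · have hmem : r.1 ∈ (L.items.filter (fun q => q.2 == 1)).map Prod.fst :=
      of_decide_eq_true (by rw [hz]; simp [h1])
    simp [h1, hmem]
  · have hmem : r.1 ∉ (L.items.filter (fun q => q.2 == 1)).map Prod.fst :=
      of_decide_eq_false (by rw [hz]; simp [h1])
    have h2 : r.2 - 1 ≠ 0 := by omega
    simp [hmem, h2]

lemma pvStep (k item : Int) (L c : PySem.Dict Int Int) (off minv : Int)
    (h : pvRel L c off minv) :
    pvRel (pvStepA k L item) (pvStepB k (c, off, minv) item).1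
      (pvStepB k (c, off, minv) item).2.1 (pvStepB k (c, off, minv) item).2.2 := by
  obtain ⟨hitems, hvals, hnod⟩ := h
  have hnodL : (L.items.map Prod.fst).Nodup := by
    rw [hitems, pvMapFstMap c.items (fun p => (p.1, p.2 - off)) (fun p => rfl)]
    exact hnod
  have hcont : L.contains item = c.contains item := by
    simp only [PySem.Dict.contains, hitems, List.any_map]; rfl
  have hsize : (L.size : Int) = (c.size : Int) := by
    simp [PySem.Dict.size, hitems]
  by_cases hc : c.contains item = true
  · -- increment branch
    have hLc : L.contains item = true := by rw [hcont]; exact hc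
    cases hf : c.items.find? (fun p => p.1 == item) with
    | none =>
      exfalso
      obtain ⟨p, hp, hpe⟩ : ∃ p ∈ c.items, (p.1 == item) = true := by
        simpa [PySem.Dict.contains, List.any_eq_true] using hc
      exact (List.find?_eq_none.mp hf p hp) hpe
    | some r =>
      have hrmem : r ∈ c.items := List.mem_of_find?_eq_some hf
      have hLget : L.getD item 0 = r.2 - off := by
        simp only [PySem.Dict.getD, PySem.Dict.get?, hitems]
        rw [pvFindMap c.items (fun p => (p.1, p.2 - off)) (fun p => rfl) item, hf]
        rfl
      have hcget : c.getD item 0 = r.2 := by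
        simp [PySem.Dict.getD, PySem.Dict.get?, hf]
      have hA : pvStepA k L item = L.insert item (r.2 - off + 1) := by
        simp [pvStepA, hLc, PySem.Dict.modify, hLget]
      have hB : pvStepB k (c, off, minv) item = (c.insert item (r.2 + 1), off, minv) := by
        simp [pvStepB, hc, PySem.Dict.modify, hcget]
      rw [hA, hB]
      have hins : (L.insert item (r.2 - off + 1)).items
          = L.items.map (fun p => if p.1 == item then (item, r.2 - off + 1) else p) := by
        simp [PySem.Dict.insert, hLc]
      have hinsc : (c.insert item (r.2 + 1)).items
          = c.items.map (fun p => if p.1 == item then (item, r.2 + 1) else p) := by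
        simp [PySem.Dict.insert, hc]
      refine ⟨?_, ?_, ?_⟩
      · dsimp only
        rw [hins, hinsc, hitems, List.map_map, List.map_map]
        refine List.map_congr_left (fun p hp => ?_)
        by_cases hpi : p.1 = item
        · have hbe : (p.1 == item) = true := by simp [hpi]
          simp only [Function.comp_apply, hbe, if_true]
          simp only [Prod.mk.injEq, true_and]
          omega
        · have hbe : (p.1 == item) = false := by simp [hpi]
          simp [Function.comp, hbe]
      · dsimp only
        intro p hp
        rw [hinsc] at hp
        obtain ⟨q, hq, rfl⟩ := List.mem_map.mp hp
        by_cases hqi : q.1 = item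
        · have hbe : (q.1 == item) = true := by simp [hqi]
          obtain ⟨h1, h2⟩ := hvals r hrmem
          simp only [hbe, if_true]
          constructor <;> omega
        · have hbe : (q.1 == item) = false := by simp [hqi]
          simp only [hbe, Bool.false_eq_true, if_false]
          exact hvals q hq
      · dsimp only
        rw [hinsc, pvFstRepl]
        exact hnod
  · have hc0 : c.contains item = false := by simpa using hc
    have hL0 : L.contains item = false := by rw [hcont]; exact hc0
    by_cases hk : (c.size : Int) < k
    · -- fresh insert branch
      have hA : pvStepA k L item = L.insert item 1 := by
        simp [pvStepA, hL0, hsize, hk]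
      have hB : pvStepB k (c, off, minv) item = (c.insert item (off + 1), off, off + 1) := by
        simp [pvStepB, hc0, hk]
      rw [hA, hB]
      have hins : (L.insert item 1).items = L.items ++ [(item, 1)] := by
        simp [PySem.Dict.insert, hL0]
      have hinsc : (c.insert item (off + 1)).items = c.items ++ [(item, off + 1)] := by
        simp [PySem.Dict.insert, hc0]
      have hnotin : item ∉ c.items.map Prod.fst := by
        intro hm
        obtain ⟨p, hp, hpe⟩ := List.mem_map.mp hm
        have : c.contains item = true := by
          simp only [PySem.Dict.contains, List.any_eq_true]
          exact ⟨p, hp, by simp [hpe]⟩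
        rw [this] at hc0
        exact absurd hc0 (by simp)
      refine ⟨?_, ?_, ?_⟩
      · dsimp only
        rw [hins, hinsc, hitems, List.map_append]
        simp only [List.map_cons, List.map_nil]
        have : off + 1 - off = (1 : Int) := by omega
        rw [this]
      · dsimp only
        intro p hp
        rw [hinsc] at hp
        rcases List.mem_append.mp hp with hp | hp
        · obtain ⟨h1, h2⟩ := hvals p hp
          constructor <;> omega
        · have : p = (item, off + 1) := by simpa using hp
          rw [this]
          constructor <;> simp
      · dsimp only
        rw [hinsc, List.map_append]
        simp only [List.map_cons, List.map_nil]
        apply List.Nodup.append hnod (List.nodup_singleton _)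
        intro x hx hx2
        have : x = item := by simpa using hx2
        exact hnotin (this ▸ hx)
    · -- decrement branch
      have hA : pvStepA k L item
          = ((L.keys.foldl pvDecStep (L, ([] : List Int))).2.foldl
              (fun d key => d.erase key) (L.keys.foldl pvDecStep (L, ([] : List Int))).1) := by
        simp [pvStepA, hL0, hsize, hk]
      by_cases hm : minv ≤ off + 1
      · have hB : pvStepB k (c, off, minv) item
            = (PySem.Dict.mk (c.items.filter (fun p => off + 1 < p.2)), off + 1,
               PySem.List.minD (PySem.Dict.mk (c.items.filter (fun p => off + 1 < p.2))).values
                 (fun v => v) (off + 1)) := by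
          simp [pvStepB, hc0, hk, hm]
        rw [hB]
        refine ⟨?_, ?_, ?_⟩
        · dsimp only
          rw [hA, pvStepA_dec L hnodL, hitems, List.map_map, List.filter_map]
          have hPQ : c.items.filter ((fun q => !(q.2 == 0)) ∘
                ((fun q => (q.1, q.2 - 1)) ∘ fun p => (p.1, p.2 - off)))
              = c.items.filter (fun p => decide (off + 1 < p.2)) := by
            refine List.filter_congr (fun p hp => ?_)
            obtain ⟨h1, h2⟩ := hvals p hp
            by_cases hlt : off + 1 < p.2
            · have hne : p.2 - off - 1 ≠ 0 := by omega
              simp [Function.comp, hlt, hne]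
            · have heq0 : p.2 - off - 1 = 0 := by omega
              simp [Function.comp, hlt, heq0]
          rw [hPQ]
          refine List.map_congr_left (fun p hp => ?_)
          simp only [Function.comp_apply, Prod.mk.injEq, true_and]
          omega
        · dsimp only
          intro p hp
          have h1 : off + 1 < p.2 := by
            have := List.of_mem_filter hp
            simpa using this
          refine ⟨h1, ?_⟩
          have hv : p.2 ∈ (c.items.filter (fun p => decide (off + 1 < p.2))).map (fun x => x.2) :=
            List.mem_map.mpr ⟨p, hp, rfl⟩
          show PySem.List.minD ((c.items.filter (fun p => decide (off + 1 < p.2))).map (fun x => x.2))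
              (fun v => v) (off + 1) ≤ p.2
          cases hmin : PySem.List.min?
              ((c.items.filter (fun p => decide (off + 1 < p.2))).map (fun x => x.2))
              (fun v => v) with
          | none =>
            rw [PySem.List.min?_eq_none_iff] at hmin
            rw [hmin] at hv
            simp at hv
          | some m =>
            have hle := PySem.List.min?_isMin hmin p.2 hv
            simp only [PySem.List.minD, hmin, Option.getD_some]
            exact hle
        · dsimp only
          have hsub : List.Sublist
              ((c.items.filter (fun p => decide (off + 1 < p.2))).map Prod.fst)
              (c.items.map Prod.fst) :=
            List.Sublist.map Prod.fst List.filter_sublist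
          exact List.Nodup.sublist hsub hnod
      · have hB : pvStepB k (c, off, minv) item = (c, off + 1, minv) := by
          simp [pvStepB, hc0, hk, hm]
        rw [hB]
        refine ⟨?_, ?_, ?_⟩
        · dsimp only
          rw [hA, pvStepA_dec L hnodL, hitems, List.map_map, List.filter_map]
          have hPQ : c.items.filter ((fun q => !(q.2 == 0)) ∘
                ((fun q => (q.1, q.2 - 1)) ∘ fun p => (p.1, p.2 - off)))
              = c.items := by
            refine List.filter_eq_self.mpr (fun p hp => ?_)
            obtain ⟨h1, h2⟩ := hvals p hp
            have hne : p.2 - off - 1 ≠ 0 := by omega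
            simp [Function.comp, hne]
          rw [hPQ]
          refine List.map_congr_left (fun p hp => ?_)
          simp only [Function.comp_apply, Prod.mk.injEq, true_and]
          omega
        · dsimp only
          intro p hp
          obtain ⟨h1, h2⟩ := hvals p hp
          exact ⟨by omega, h2⟩
        · dsimp only
          exact hnod

lemma pvLoop (k : Int) (rest : List Int) : ∀ (L c : PySem.Dict Int Int) (off minv : Int),
    pvRel L c off minv →
    pvRel (rest.foldl (pvStepA k) L)
      (rest.foldl (pvStepB k) (c, off, minv)).1
      (rest.foldl (pvStepB k) (c, off, minv)).2.1
      (rest.foldl (pvStepB k) (c, off, minv)).2.2 := by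
  induction rest with
  | nil => intro L c off minv h; exact h
  | cons a t ih =>
    intro L c off minv h
    rw [List.foldl_cons, List.foldl_cons]
    exact ih (pvStepA k L a) (pvStepB k (c, off, minv) a).1
      (pvStepB k (c, off, minv) a).2.1 (pvStepB k (c, off, minv) a).2.2
      (pvStep k a L c off minv h)

-- ===== VERDICT (by name: the statement is the Claim_ definition above) =====
theorem deterministic_heavy_hitters_spec : Claim_equal_deterministic_heavy_hitters := by
  unfold Claim_equal_deterministic_heavy_hitters
  intro stream k _
  unfold Spec_deterministic_heavy_hitters
  have h0 : pvRel PySem.Dict.empty PySem.Dict.empty 0 0 := by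
    refine ⟨rfl, ?_, ?_⟩ <;> simp [PySem.Dict.empty]
  have h := pvLoop k stream PySem.Dict.empty PySem.Dict.empty 0 0 h0
  exact h.1
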